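-- pv_equiv track=rewrite | github.com/josenalde/palmaS_counting_system | src/test10.py | consultaLista
-- ===== SOURCE A (Python) =====
-- def consultaLista(p, L):
--     nb = 2 #neighboorhood
--     e = 0
--     while e < len(L):
--         # test for np = 3
--         # t = p+nb in L[e] or p+nb-1 in L[e] or p+nb-2 in L[e] or \
--         #     p-nb in L[e] or p-nb+1 in L[e] or p-nb+2 in L[e] or \
--         #     p in L[e]
--         # # test for np = 2
--         t = p+nb in L[e] or p+nb-1 in L[e] or \
--             p-nb in L[e] or p-nb+1 in L[e] or \
--             p in L[e]
--         if (t):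
--             return True
--         else:
--             e += 1
--     return False
-- ===== SOURCE B (Python) =====
-- def consultaLista(p, L):
--     return any(abs(v - p) <= 2 for sub in L for v in sub)
-- ===== Notes on version B (the rewrite author's own statement) =====
-- stated objective: simpler
-- what changed: A scans each sublist five times (once per target p-2..p+2) with an index-driven while loop; B makes one pass over the actual elements and tests |v - p| <= 2, short-circuiting with any().
import Mathlib
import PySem

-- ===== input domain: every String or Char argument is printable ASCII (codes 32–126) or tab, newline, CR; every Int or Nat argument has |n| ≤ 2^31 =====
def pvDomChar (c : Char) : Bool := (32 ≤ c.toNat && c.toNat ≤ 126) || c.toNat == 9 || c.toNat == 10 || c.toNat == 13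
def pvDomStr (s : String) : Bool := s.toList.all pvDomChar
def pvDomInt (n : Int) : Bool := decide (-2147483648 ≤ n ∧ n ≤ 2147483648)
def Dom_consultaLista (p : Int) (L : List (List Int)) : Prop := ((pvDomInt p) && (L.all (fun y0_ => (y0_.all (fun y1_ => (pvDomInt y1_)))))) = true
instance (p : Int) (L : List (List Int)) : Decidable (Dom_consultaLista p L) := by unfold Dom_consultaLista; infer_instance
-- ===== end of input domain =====

-- B replaces A's five membership scans per sublist by a single pass over the elements testing |v - p| <= 2 (objective: simpler).

-- ===== PORT A =====
-- the while loop over index e becomes structural recursion over L; the five `in` tests keep their order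
def consultaLista (p : Int) (L : List (List Int)) : Bool :=
  match L with
  | [] => false
  | sub :: rest =>
      let nb : Int := 2
      let t := sub.contains (p + nb) || sub.contains (p + nb - 1) ||
               sub.contains (p - nb) || sub.contains (p - nb + 1) ||
               sub.contains p
      if t then true else consultaLista p rest

-- ===== PORT B =====
def consultaLista_alt (p : Int) (L : List (List Int)) : Bool :=
  L.any (fun sub => sub.any (fun v => decide (|v - p| ≤ 2)))

-- ===== PRECONDITION & SPEC =====
def Spec_consultaLista (p : Int) (L : List (List Int)) (out : Bool) : Prop := out = consultaLista_alt p L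
instance (p : Int) (L : List (List Int)) (out : Bool) : Decidable (Spec_consultaLista p L out) := by unfold Spec_consultaLista; infer_instance

-- ===== CLAIM (what is proved, stated in full; the proofs are below) =====
def Claim_equal_consultaLista : Prop := ∀ (p : Int) (L : List (List Int)), Dom_consultaLista p L → Spec_consultaLista p L (consultaLista p L)

-- ===== LEMMAS AND PROOFS =====
theorem consultaLista_sub (p : Int) (sub : List Int) :
    (sub.contains (p + 2) || sub.contains (p + 2 - 1) ||
     sub.contains (p - 2) || sub.contains (p - 2 + 1) ||
     sub.contains p) = sub.any (fun v => decide (|v - p| ≤ 2)) := by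
  rw [Bool.eq_iff_iff]
  simp only [Bool.or_eq_true, List.contains_eq_mem, List.any_eq_true,
    decide_eq_true_eq, abs_le]
  constructor
  · rintro ((((h | h) | h) | h) | h) <;> exact ⟨_, h, by omega⟩
  · rintro ⟨v, hv, h1, h2⟩
    have : v = p + 2 ∨ v = p + 2 - 1 ∨ v = p - 2 ∨ v = p - 2 + 1 ∨ v = p := by omega
    rcases this with h | h | h | h | h <;> subst h <;> tauto

-- ===== VERDICT (by name: the statement is the Claim_ definition above) =====
theorem consultaLista_spec : Claim_equal_consultaLista := by
  intro p L hdom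
  unfold Spec_consultaLista
  induction L with
  | nil => rfl
  | cons sub rest ih =>
      have hdr : Dom_consultaLista p rest := by
        simp only [Dom_consultaLista, List.all_cons, Bool.and_eq_true] at hdom ⊢
        tauto
      simp only [consultaLista, consultaLista_alt, List.any_cons]
      rw [← consultaLista_sub p sub, ih hdr]
      simp [consultaLista_alt]
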